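-- pv_equiv track=rewrite | github.com/manwar/perlweeklychallenge-club | challenge-247/roger-bell-west/python/ch-2.py | mostfrequentletterpair
-- ===== SOURCE A (Python) =====
-- from collections import defaultdict
--
-- def mostfrequentletterpair(s):
--   f = defaultdict(lambda: 0)
--   for i in range(len(s) - 1):
--     pair = s[i] + s[i+1]
--     f[pair] += 1
--   m = max(f.values())
--   l = [i for i in f.keys() if f[i] == m]
--   l.sort()
--   return l[0]
-- ===== SOURCE B (Python) =====
-- def mostfrequentletterpair(s):
--   pairs = sorted(s[i] + s[i + 1] for i in range(len(s) - 1))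
--   best, best_run, run, prev = pairs[0], 0, 0, None
--   for p in pairs:
--     run = run + 1 if p == prev else 1
--     prev = p
--     if run > best_run:
--       best, best_run = p, run
--   return best
-- ===== Notes on version B (the rewrite author's own statement) =====
-- stated objective: alternative
-- what changed: B drops the counting dict entirely: it sorts the list of adjacent pairs and scans it once, tracking the current run length and keeping the first (hence lexicographically smallest) longest run, instead of A's dict counter followed by max over values, filter, sort and index.
import Mathlib
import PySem

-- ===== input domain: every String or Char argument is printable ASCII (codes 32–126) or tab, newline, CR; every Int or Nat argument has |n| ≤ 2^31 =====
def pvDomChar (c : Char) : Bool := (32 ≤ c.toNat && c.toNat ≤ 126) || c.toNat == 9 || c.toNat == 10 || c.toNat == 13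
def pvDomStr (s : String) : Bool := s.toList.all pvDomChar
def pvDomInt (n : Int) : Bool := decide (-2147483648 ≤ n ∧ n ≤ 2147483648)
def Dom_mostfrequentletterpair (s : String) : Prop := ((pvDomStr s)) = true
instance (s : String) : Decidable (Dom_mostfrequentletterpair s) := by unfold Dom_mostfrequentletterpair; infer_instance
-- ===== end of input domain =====

-- B replaces A's dict counter + max/filter/sort/index by a sort of the pair list
-- followed by a single run-length scan keeping the first longest run (objective: alternative).

-- ===== PORT A =====
-- for i in range(len(s)-1): f[s[i]+s[i+1]] += 1   (s[i] is always in range here, so .getD ' ' is never used)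
def mostfrequentletterpair (s : String) : String :=
  let f : PySem.Dict String Int :=
    (PySem.List.pyRange 0 (PySem.Str.len s - 1) 1).foldl
      (fun d i =>
        let pair := String.ofList [((PySem.Str.pyGet? s i).getD ' '), ((PySem.Str.pyGet? s (i + 1)).getD ' ')]
        d.modify pair 0 (· + 1))
      PySem.Dict.empty
  match PySem.List.max? f.values (fun v => v) with
  | none => ""          -- max() over the empty values: Python raises ValueError (excluded by Pre_)
  | some m =>
    let l := f.keys.filter (fun k => f.getD k 0 == m)
    let l := PySem.List.sorted l (fun x => x) false
    (PySem.List.pyGet? l 0).getD ""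

-- ===== PORT B =====
-- the loop body of B: state (best, best_run, run, prev);
-- run = run + 1 if p == prev else 1; prev = p; if run > best_run: best, best_run = p, run
def pvScanStep (st : String × Int × Int × Option String) (p : String) :
    String × Int × Int × Option String :=
  let run : Int := if some p = st.2.2.2 then st.2.2.1 + 1 else 1
  if run > st.2.1 then (p, run, run, some p) else (st.1, st.2.1, run, some p)

-- pairs = sorted(s[i]+s[i+1] for i in range(len(s)-1)); best = pairs[0]; run scan
def mostfrequentletterpair_alt (s : String) : String :=
  let pairs := PySem.List.sorted
    ((PySem.List.pyRange 0 (PySem.Str.len s - 1) 1).map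
      (fun i => String.ofList [((PySem.Str.pyGet? s i).getD ' '), ((PySem.Str.pyGet? s (i + 1)).getD ' ')]))
    (fun x => x) false
  match PySem.List.pyGet? pairs 0 with
  | none => ""          -- pairs[0] on the empty list: Python raises IndexError (excluded by Pre_)
  | some b0 => (pairs.foldl pvScanStep (b0, 0, 0, none)).1

-- ===== PRECONDITION & SPEC =====
-- Pre_ excludes exactly the strings of length < 2: there A raises ValueError (max of an
-- empty sequence) and B raises IndexError (pairs[0] on an empty list).
def Pre_mostfrequentletterpair (s : String) : Prop := 2 ≤ PySem.Str.len s
instance (s : String) : Decidable (Pre_mostfrequentletterpair s) := by unfold Pre_mostfrequentletterpair; infer_instance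
def pvWitness_mostfrequentletterpair : String := "aab"

def Spec_mostfrequentletterpair (s : String) (out : String) : Prop := out = mostfrequentletterpair_alt s
instance (s : String) (out : String) : Decidable (Spec_mostfrequentletterpair s out) := by unfold Spec_mostfrequentletterpair; infer_instance

-- ===== CLAIM (what is proved, stated in full; the proofs are below) =====
def Claim_equal_mostfrequentletterpair : Prop := ∀ (s : String), Dom_mostfrequentletterpair s → Pre_mostfrequentletterpair s → Spec_mostfrequentletterpair s (mostfrequentletterpair s)

-- ===== LEMMAS AND PROOFS =====

-- the list of adjacent-pair strings, the common ground of both ports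
def pvPairs (cs : List Char) : List String :=
  (cs.zip cs.tail).map (fun p => String.ofList [p.1, p.2])

-- "r is the best pair of K" : in K, and beats every element of K on (count, then lex-min)
def pvIsBest (K : List String) (c : String → Int) (r : String) : Prop :=
  r ∈ K ∧ ∀ k ∈ K, c k < c r ∨ (c k = c r ∧ r ≤ k)

theorem pvIsBest_unique {K : List String} {c : String → Int} {r₁ r₂ : String}
    (h₁ : pvIsBest K c r₁) (h₂ : pvIsBest K c r₂) : r₁ = r₂ := by
  rcases h₁ with ⟨m₁, b₁⟩
  rcases h₂ with ⟨m₂, b₂⟩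
  rcases b₁ r₂ m₂ with h | ⟨hc, hle⟩
  · rcases b₂ r₁ m₁ with h' | ⟨hc', hle'⟩
    · omega
    · omega
  · rcases b₂ r₁ m₁ with h' | ⟨hc', hle'⟩
    · omega
    · exact le_antisymm hle hle'

-- A's selection (max count, then sorted filter, then head) is the best element
theorem pvA_isBest (K : List String) (c : String → Int) (m : Int) (r : String)
    (hmax : PySem.List.max? (K.map c) (fun v => v) = some m)
    (hhead : PySem.List.pyGet?
      (PySem.List.sorted (K.filter (fun k => c k == m)) (fun x => x) false) 0 = some r) :
    pvIsBest K c r := by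
  have hub : ∀ v ∈ K.map c, v ≤ m := fun v hv => PySem.List.max?_isMax hmax v hv
  set l := K.filter (fun k => c k == m) with hl
  set ls := PySem.List.sorted l (fun x => x) false with hls
  obtain ⟨t, ht⟩ : ∃ t, ls = r :: t := by
    rcases hcase : ls with _ | ⟨x, t⟩
    · simp [hcase, PySem.List.pyGet?] at hhead
    · rw [hcase, PySem.List.pyGet?_zero_cons] at hhead
      exact ⟨t, by rw [Option.some_inj.mp hhead]⟩
  have hr_mem_l : r ∈ l := (PySem.List.mem_sorted l (fun x => x) false r).mp (by show r ∈ ls; rw [ht]; exact List.mem_cons_self)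
  have hcr : c r = m := by simpa using List.of_mem_filter hr_mem_l
  refine ⟨List.mem_of_mem_filter hr_mem_l, ?_⟩
  intro k hk
  have hle : c k ≤ m := hub (c k) (List.mem_map_of_mem hk)
  rcases lt_or_eq_of_le hle with hlt | heq
  · exact Or.inl (by omega)
  · refine Or.inr ⟨by omega, ?_⟩
    have hkl : k ∈ l := List.mem_filter.mpr ⟨hk, by simp [heq]⟩
    have := PySem.List.key_head_sorted_le (xs := l) (key := fun x => x) (m := r) (t := t)
      (by rw [← hls, ht]) k hkl
    simpa using this

-- pvIsBest transfers along lists with the same elements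
theorem pvIsBest_of_mem_iff {K K' : List String} {c : String → Int} {r : String}
    (hmem : ∀ x : String, x ∈ K ↔ x ∈ K') (h : pvIsBest K c r) : pvIsBest K' c r :=
  ⟨(hmem r).mp h.1, fun k hk => h.2 k ((hmem k).mpr hk)⟩

-- in a ≤-sorted list, every element is ≤ the last one
theorem pv_le_getLast? {l : List String} {a lst : String}
    (h : l.Pairwise (· ≤ ·)) (hm : a ∈ l) (hl : l.getLast? = some lst) : a ≤ lst := by
  induction l with
  | nil => cases hm
  | cons x xs ih =>
    cases xs with
    | nil =>
      have h1 : a = x := by simpa using hm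
      have h2 : x = lst := by simpa using hl
      exact le_of_eq (h1.trans h2)
    | cons y ys =>
      rw [List.getLast?_cons_cons] at hl
      rcases List.mem_cons.mp hm with rfl | hm'
      · exact (List.pairwise_cons.mp h).1 lst (List.mem_of_getLast? hl)
      · exact ih (List.pairwise_cons.mp h).2 hm' hl

-- the invariant of B's scan after processing the prefix xs of the sorted pair list:
-- prev = last element, run = its count so far, (best, best_run) = first longest run so far
def pvInv (xs : List String) (st : String × Int × Int × Option String) : Prop :=
  (xs = [] → st.2.1 = 0 ∧ st.2.2.1 = 0 ∧ st.2.2.2 = none) ∧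
  (∀ l : String, xs.getLast? = some l →
      st.2.2.2 = some l ∧ st.2.2.1 = (xs.count l : Int) ∧ st.1 ∈ xs ∧
      (xs.count st.1 : Int) = st.2.1 ∧
      (∀ v ∈ xs, (xs.count v : Int) ≤ st.2.1) ∧
      (∀ v ∈ xs, (xs.count v : Int) = st.2.1 → st.1 ≤ v))

theorem pvScanStep_inv (xs : List String) (y : String) (st : String × Int × Int × Option String)
    (hsorted : (xs ++ [y]).Pairwise (· ≤ ·)) (hinv : pvInv xs st) :
    pvInv (xs ++ [y]) (pvScanStep st y) := by
  obtain ⟨b, br, r, pv⟩ := st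
  have hxy : ∀ v ∈ xs, v ≤ y := fun v hv =>
    (List.pairwise_append.mp hsorted).2.2 v hv y (List.mem_singleton.mpr rfl)
  have hxs_pw : xs.Pairwise (· ≤ ·) := (List.pairwise_append.mp hsorted).1
  have hcnt : ∀ v : String, (xs ++ [y]).count v = xs.count v + (if v = y then 1 else 0) := by
    intro v
    by_cases h : v = y
    · subst h; simp [List.count_append]
    · have h0 : List.count v [y] = 0 := List.count_eq_zero.mpr (by simp [h])
      simp [List.count_append, h0, h]
  have hlast : (xs ++ [y]).getLast? = some y := List.getLast?_concat
  by_cases hxe : xs = []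
  · subst hxe
    obtain ⟨hbr, hr, hpv⟩ := hinv.1 rfl
    simp only at hbr hr hpv
    subst hbr; subst hr; subst hpv
    have hstep : pvScanStep (b, 0, 0, none) y = (y, 1, 1, some y) := by
      simp [pvScanStep]
    rw [hstep]
    constructor
    · intro h; simp at h
    · intro l2 hl2
      have hl2y : l2 = y := by
        have h1 : y = l2 := by simpa using hl2
        exact h1.symm
      rw [hl2y]
      refine ⟨rfl, by simp, by simp, by simp, ?_, ?_⟩
      · intro v hv
        have : v = y := by simpa using hv
        subst this; simp
      · intro v hv _
        have hvy : v = y := by simpa using hv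
        rw [hvy]
  · obtain ⟨l, hl⟩ : ∃ l, xs.getLast? = some l := by
      rcases hg : xs.getLast? with _ | l
      · rw [List.getLast?_eq_none_iff] at hg; exact absurd hg hxe
      · exact ⟨l, rfl⟩
    obtain ⟨hpv, hr, hbmem, hbc, hub, hties⟩ := hinv.2 l hl
    simp only at hpv hr hbmem hbc hub hties
    have hlmem : l ∈ xs := List.mem_of_getLast? hl
    have hly : l ≤ y := hxy l hlmem
    have hyxs : ∀ _ : y ∈ xs, y = l := fun hm => le_antisymm (pv_le_getLast? hxs_pw hm hl) hly
    set run' : Int := if some y = pv then r + 1 else 1 with hrun'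
    have hstep : pvScanStep (b, br, r, pv) y
        = if run' > br then (y, run', run', some y) else (b, br, run', some y) := rfl
    have hrunc : run' = ((xs ++ [y]).count y : Int) := by
      by_cases hc : y = l
      · subst hc
        rw [hrun', hpv, if_pos rfl, hr, hcnt y, if_pos rfl]
        push_cast; ring
      · have hy0 : xs.count y = 0 := by
          rw [List.count_eq_zero]
          intro hm; exact hc (hyxs hm)
        rw [hrun', hpv, if_neg (by simpa using fun h : y = l => hc h), hcnt y, if_pos rfl, hy0]
        simp
    have hmem_cases : ∀ v : String, v ∈ xs ++ [y] → v ∈ xs ∨ v = y := by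
      intro v hv
      rcases List.mem_append.mp hv with h | h
      · exact Or.inl h
      · exact Or.inr (by simpa using h)
    rw [hstep]
    split_ifs with hgt
    · -- new run is strictly longer: best becomes y
      constructor
      · intro h; simp at h
      · intro l2 hl2
        have hl2y : l2 = y := by rw [hlast] at hl2; exact (Option.some_inj.mp hl2).symm
        rw [hl2y]
        refine ⟨rfl, hrunc, List.mem_append_right _ (List.mem_singleton.mpr rfl), hrunc.symm, ?_, ?_⟩
        · intro v hv
          rcases hmem_cases v hv with hvx | rfl
          · by_cases hvy : v = y
            · subst hvy; exact le_of_eq hrunc.symm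
            · have h1 : (xs ++ [y]).count v = xs.count v := by rw [hcnt v, if_neg hvy]; ring
              have h2 : (xs.count v : Int) ≤ br := hub v hvx
              show ((xs ++ [y]).count v : Int) ≤ run'
              rw [h1]; omega
          · exact le_of_eq hrunc.symm
        · intro v hv hveq
          by_cases hvy : v = y
          · subst hvy; exact le_refl v
          · have hvx : v ∈ xs := by
              rcases hmem_cases v hv with h | h
              · exact h
              · exact absurd h hvy
            have h1 : (xs ++ [y]).count v = xs.count v := by rw [hcnt v, if_neg hvy]; ring
            have h2 : (xs.count v : Int) ≤ br := hub v hvx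
            have hveq' : ((xs ++ [y]).count v : Int) = run' := hveq
            rw [h1] at hveq'
            omega
    · -- run does not beat the recorded best
      have hbyne : b ≠ y := by
        intro hby
        have h1 : run' = (xs.count y : Int) + 1 := by
          rw [hrunc, hcnt y, if_pos rfl]; push_cast; ring
        have h2 : (xs.count y : Int) = br := by rw [← hby]; exact hbc
        omega
      constructor
      · intro h; simp at h
      · intro l2 hl2
        have hl2y : l2 = y := by rw [hlast] at hl2; exact (Option.some_inj.mp hl2).symm
        rw [hl2y]
        have hbcnt : (xs ++ [y]).count b = xs.count b := by rw [hcnt b, if_neg hbyne]; ring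
        refine ⟨rfl, hrunc, List.mem_append_left _ hbmem, by rw [hbcnt]; exact hbc, ?_, ?_⟩
        · intro v hv
          by_cases hvy : v = y
          · rw [hvy]
            show ((xs ++ [y]).count y : Int) ≤ br
            rw [← hrunc]; omega
          · have hvx : v ∈ xs := by
              rcases hmem_cases v hv with h | h
              · exact h
              · exact absurd h hvy
            have h1 : (xs ++ [y]).count v = xs.count v := by rw [hcnt v, if_neg hvy]; ring
            rw [h1]; exact hub v hvx
        · intro v hv hveq
          by_cases hvy : v = y
          · subst hvy; exact hxy b hbmem
          · have hvx : v ∈ xs := by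
              rcases hmem_cases v hv with h | h
              · exact h
              · exact absurd h hvy
            have h1 : (xs ++ [y]).count v = xs.count v := by rw [hcnt v, if_neg hvy]; ring
            rw [h1] at hveq
            exact hties v hvx hveq

theorem pvScan_inv (ys : List String) : ∀ (xs : List String) (st : String × Int × Int × Option String),
    (xs ++ ys).Pairwise (· ≤ ·) → pvInv xs st → pvInv (xs ++ ys) (ys.foldl pvScanStep st) := by
  induction ys with
  | nil => intro xs st h hinv; simpa using hinv
  | cons y t ih =>
    intro xs st h hinv
    have hassoc : xs ++ y :: t = (xs ++ [y]) ++ t := by simp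
    rw [hassoc] at h ⊢
    exact ih (xs ++ [y]) (pvScanStep st y) h
      (pvScanStep_inv xs y st (h.sublist (List.sublist_append_left _ t)) hinv)

-- B's sorted run scan returns the best element of L
theorem pvB_isBest (L : List String) (hL : L ≠ []) (b0 : String) :
    pvIsBest L (fun k => (L.count k : Int))
      (((PySem.List.sorted L (fun x => x) false).foldl pvScanStep (b0, 0, 0, none)).1) := by
  set S := PySem.List.sorted L (fun x => x) false with hS
  have hperm : S.Perm L := PySem.List.sorted_perm L (fun x => x) false
  have hpw : S.Pairwise (· ≤ ·) := by
    have := PySem.List.sorted_pairwise (xs := L) (key := fun x => x)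
    simpa using this
  have hSne : S ≠ [] := by
    rw [hS, Ne, PySem.List.sorted_eq_nil_iff]; exact hL
  have hinv : pvInv S ((S.foldl pvScanStep (b0, 0, 0, none))) := by
    have := pvScan_inv S [] (b0, 0, 0, none) (by simpa using hpw)
      (by constructor
          · intro _; exact ⟨rfl, rfl, rfl⟩
          · intro l hl; simp at hl)
    simpa using this
  obtain ⟨lst, hlst⟩ : ∃ lst, S.getLast? = some lst := by
    rcases hg : S.getLast? with _ | lst
    · rw [List.getLast?_eq_none_iff] at hg
      exact absurd hg hSne
    · exact ⟨lst, rfl⟩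
  obtain ⟨_, _, hmem, hcnt, hub, hties⟩ := hinv.2 lst hlst
  set st := S.foldl pvScanStep (b0, 0, 0, none)
  have hcount : ∀ v : String, S.count v = L.count v := fun v => hperm.count_eq v
  refine ⟨hperm.mem_iff.mp hmem, ?_⟩
  intro k hk
  have hkS : k ∈ S := hperm.mem_iff.mpr hk
  have h1 : (S.count k : Int) ≤ st.2.1 := hub k hkS
  rcases lt_or_eq_of_le h1 with hlt | heq
  · refine Or.inl ?_
    show (L.count k : Int) < (L.count st.1 : Int)
    rw [← hcount k, ← hcount st.1, hcnt]
    omega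
  · refine Or.inr ⟨?_, hties k hkS heq⟩
    show (L.count k : Int) = (L.count st.1 : Int)
    rw [← hcount k, ← hcount st.1, hcnt]
    omega

-- the adjacent-pair list written by index equals the zip form
theorem pvPairsA_eq (cs : List Char) :
    (PySem.List.pyRange 0 ((cs.length : Int) - 1) 1).map
      (fun i => String.ofList [((PySem.List.pyGet? cs i).getD ' '),
                               ((PySem.List.pyGet? cs (i + 1)).getD ' ')])
      = pvPairs cs := by
  apply List.ext_getElem
  · simp [pvPairs, PySem.List.length_pyRange_one]
  · intro k h1 h2
    have hk : k + 1 < cs.length := by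
      simp only [List.length_map, PySem.List.length_pyRange_one] at h1
      omega
    simp only [List.getElem_map, PySem.List.getElem_pyRange_one, pvPairs, List.getElem_zip, zero_add]
    have e1 : PySem.List.pyGet? cs (k : Int) = some cs[k] := by
      rw [PySem.List.pyGet?_natCast]; exact List.getElem?_eq_getElem (by omega)
    have e2 : PySem.List.pyGet? cs ((k : Int) + 1) = some cs[k + 1] := by
      have h3 : ((k : Int) + 1) = ((k + 1 : Nat) : Int) := by push_cast; ring
      rw [h3, PySem.List.pyGet?_natCast]; exact List.getElem?_eq_getElem (by omega)
    rw [e1, e2]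
    simp [List.getElem_tail]

-- A's counting loop is Counter(pvPairs)
theorem pvA_dict (s : String) :
    (PySem.List.pyRange 0 (PySem.Str.len s - 1) 1).foldl
      (fun d i =>
        let pair := String.ofList [((PySem.Str.pyGet? s i).getD ' '), ((PySem.Str.pyGet? s (i + 1)).getD ' ')]
        d.modify pair 0 (· + 1))
      PySem.Dict.empty
    = PySem.Dict.counter (pvPairs s.toList) := by
  show (PySem.List.pyRange 0 (PySem.Str.len s - 1) 1).foldl
      (fun d i => d.modify
        (String.ofList [((PySem.Str.pyGet? s i).getD ' '), ((PySem.Str.pyGet? s (i + 1)).getD ' ')])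
        0 (· + 1))
      PySem.Dict.empty
    = PySem.Dict.counter (pvPairs s.toList)
  rw [PySem.Str.len_eq, ← pvPairsA_eq s.toList, PySem.Dict.counter_eq_foldl, List.foldl_map]
  rfl

theorem pvPairs_ne_nil {cs : List Char} (h : 2 ≤ cs.length) : pvPairs cs ≠ [] := by
  have h0 : 0 < (pvPairs cs).length := by
    simp [pvPairs]
    omega
  exact List.ne_nil_of_length_pos h0

-- selection over the pair list L: A's max/filter/sort/head = B's sorted run scan
theorem pvSelect_eq (L : List String) (hL : L ≠ []) :
    (match PySem.List.max? (PySem.Dict.counter L).values (fun v => v) with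
     | none => ""
     | some m =>
       (PySem.List.pyGet? (PySem.List.sorted
         ((PySem.Dict.counter L).keys.filter (fun k => (PySem.Dict.counter L).getD k 0 == m))
         (fun x => x) false) 0).getD "")
    =
    (match PySem.List.pyGet? (PySem.List.sorted L (fun x => x) false) 0 with
     | none => ""
     | some b0 => (((PySem.List.sorted L (fun x => x) false).foldl pvScanStep (b0, 0, 0, none)).1)) := by
  have hgetD : ∀ k, (PySem.Dict.counter L).getD k 0 = ((List.count k L : Int)) :=
    fun k => PySem.Dict.getD_counter L k
  have hkeys : (PySem.Dict.counter L).keys = PySem.Set.ofList L := PySem.Dict.keys_counter L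
  have hvals : (PySem.Dict.counter L).values
      = (PySem.Set.ofList L : List String).map (fun k => ((List.count k L : Int))) := by
    show ((PySem.Dict.counter L).items).map (·.2) = _
    rw [PySem.Dict.items_counter]
    simp
  -- the right-hand side: the sorted list is nonempty, so pyGet? gives its head
  have hSne : PySem.List.sorted L (fun x => x) false ≠ [] := by
    rw [Ne, PySem.List.sorted_eq_nil_iff]; exact hL
  rcases hs : PySem.List.sorted L (fun x => x) false with _ | ⟨b0, t⟩
  · exact absurd hs hSne
  · rw [PySem.List.pyGet?_zero_cons]
    -- the left-hand side: values nonempty so max? = some m, filter nonempty so head exists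
    obtain ⟨p, hp⟩ := List.exists_mem_of_ne_nil L hL
    have hpK : p ∈ (PySem.Set.ofList L : List String) := (PySem.Set.mem_ofList L p).mpr hp
    have hKne : (PySem.Set.ofList L : List String) ≠ [] := List.ne_nil_of_mem hpK
    rcases hm : PySem.List.max? ((PySem.Dict.counter L).values) (fun v => v) with _ | m
    · rw [PySem.List.max?_eq_none_iff] at hm
      rw [hvals] at hm
      simp at hm
      exact absurd hm hKne
    · -- name the head of A's sorted filtered list
      have hm' : PySem.List.max? ((PySem.Set.ofList L : List String).map (fun k => ((List.count k L : Int)))) (fun v => v) = some m := by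
        rw [← hvals]; exact hm
      have hmem : m ∈ (PySem.Set.ofList L : List String).map (fun k => ((List.count k L : Int))) :=
        PySem.List.max?_mem hm'
      obtain ⟨k1, hk1K, hk1c⟩ := List.mem_map.mp hmem
      have hfn : (fun k => (PySem.Dict.counter L).getD k 0 == m)
          = (fun k => ((List.count k L : Int)) == m) := by
        funext k; rw [hgetD]
      have hsort_ne : PySem.List.sorted
          ((PySem.Set.ofList L : List String).filter (fun k => ((List.count k L : Int)) == m)) (fun x => x) false ≠ [] := by
        rw [Ne, PySem.List.sorted_eq_nil_iff]
        apply List.ne_nil_of_mem (a := k1)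
        exact List.mem_filter.mpr ⟨hk1K, by simp [hk1c]⟩
      rcases hsrt : PySem.List.sorted
          ((PySem.Set.ofList L : List String).filter (fun k => ((List.count k L : Int)) == m)) (fun x => x) false
        with _ | ⟨r, rt⟩
      · exact absurd hsrt hsort_ne
      · show (PySem.List.pyGet? (PySem.List.sorted
            (((PySem.Dict.counter L).keys).filter (fun k => (PySem.Dict.counter L).getD k 0 == m))
            (fun x => x) false) 0).getD ""
          = ((b0 :: t).foldl pvScanStep (b0, 0, 0, none)).1
        rw [hkeys, hfn, hsrt, PySem.List.pyGet?_zero_cons, Option.getD_some]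
        have hhead : PySem.List.pyGet? (PySem.List.sorted
            ((PySem.Set.ofList L : List String).filter (fun k => ((List.count k L : Int)) == m)) (fun x => x) false) 0
            = some r := by
          rw [hsrt]; exact PySem.List.pyGet?_zero_cons r rt
        have hA : pvIsBest L (fun k => ((List.count k L : Int))) r :=
          pvIsBest_of_mem_iff (fun x => (PySem.Set.mem_ofList L x))
            (pvA_isBest (PySem.Set.ofList L) (fun k => ((List.count k L : Int))) m r hm' hhead)
        have hB := pvB_isBest L hL b0
        rw [hs] at hB
        exact pvIsBest_unique hA hB

-- ===== VERDICT (by name: the statement is the Claim_ definition above) =====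
theorem mostfrequentletterpair_spec : Claim_equal_mostfrequentletterpair := by
  intro s _ hpre
  have hn : 2 ≤ s.toList.length := by
    unfold Pre_mostfrequentletterpair at hpre
    rw [PySem.Str.len_eq] at hpre
    exact_mod_cast hpre
  have hP : ((PySem.List.pyRange 0 (PySem.Str.len s - 1) 1).map
      (fun i => String.ofList [((PySem.Str.pyGet? s i).getD ' '), ((PySem.Str.pyGet? s (i + 1)).getD ' ')]))
      = pvPairs s.toList := by
    rw [PySem.Str.len_eq, ← pvPairsA_eq s.toList]
    rfl
  unfold Spec_mostfrequentletterpair mostfrequentletterpair mostfrequentletterpair_alt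
  rw [pvA_dict, hP]
  exact pvSelect_eq (pvPairs s.toList) (pvPairs_ne_nil hn)
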